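-- pv_equiv track=rewrite | github.com/rajeshnairnca/TradeProdIndia | scripts/production/sync_universe_map.py | _build_merged_map
-- ===== SOURCE A (Python) =====
-- def _build_merged_map(
--     db_map: dict[str, str],
--     file_map: dict[str, str],
-- ) -> tuple[dict[str, str], int]:
--     merged = dict(db_map)
--     skipped_unknown_overwrites = 0
--     for ticker, exchange in file_map.items():
--         current = str(merged.get(ticker, "")).strip().upper()
--         if exchange == "UNKNOWN" and current and current != "UNKNOWN":
--             skipped_unknown_overwrites += 1
--             continue
--         merged[ticker] = exchange
--     return merged, skipped_unknown_overwrites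
-- ===== SOURCE B (Python) =====
-- def _build_merged_map(
--     db_map: dict[str, str],
--     file_map: dict[str, str],
-- ) -> tuple[dict[str, str], int]:
--     # db-driven merge: walk db_map once, deciding each ticker's final value by
--     # looking up file_map (instead of mutating a copy while walking file_map),
--     # then append the file-only tickers in file_map order.
--     merged: dict[str, str] = {}
--     skipped_unknown_overwrites = 0
--     for ticker, db_val in db_map.items():
--         new_val = file_map.get(ticker)
--         if new_val is None:
--             merged[ticker] = db_val
--             continue
--         current = str(db_val).strip().upper()
--         if new_val == "UNKNOWN" and current and current != "UNKNOWN":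
--             skipped_unknown_overwrites += 1
--             merged[ticker] = db_val
--         else:
--             merged[ticker] = new_val
--     for ticker, new_val in file_map.items():
--         if ticker not in db_map:
--             merged[ticker] = new_val
--     return merged, skipped_unknown_overwrites
-- ===== Notes on version B (the rewrite author's own statement) =====
-- stated objective: alternative
-- what changed: A walks file_map mutating a copy of db_map; B walks db_map instead, deciding each ticker's final value by a file_map lookup, and then appends the file-only tickers in a second pass over file_map - the driving collection and the merge mechanism both change (no copy, no in-place mutation).
import Mathlib
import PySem

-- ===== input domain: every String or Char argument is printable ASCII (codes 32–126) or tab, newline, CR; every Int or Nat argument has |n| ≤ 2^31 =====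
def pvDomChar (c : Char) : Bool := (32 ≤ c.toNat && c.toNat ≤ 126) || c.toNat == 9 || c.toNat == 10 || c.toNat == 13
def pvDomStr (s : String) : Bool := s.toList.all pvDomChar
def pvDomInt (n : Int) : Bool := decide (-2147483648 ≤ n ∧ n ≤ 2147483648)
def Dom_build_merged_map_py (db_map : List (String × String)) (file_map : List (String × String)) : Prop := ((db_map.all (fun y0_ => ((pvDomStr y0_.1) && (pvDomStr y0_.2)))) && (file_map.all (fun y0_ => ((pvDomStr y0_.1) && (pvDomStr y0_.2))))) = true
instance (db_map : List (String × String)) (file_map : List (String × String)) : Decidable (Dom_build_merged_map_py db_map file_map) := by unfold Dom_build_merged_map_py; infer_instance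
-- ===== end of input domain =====

-- B replaces A's file_map-driven mutate-a-copy loop by a db_map-driven merge: it walks db_map
-- deciding each ticker's final value by a file_map lookup, then appends the file-only tickers
-- (alternative decomposition, same cost).


-- ===== PORT A =====
-- one loop iteration of A: read current from the mutating copy, skip or overwrite
def pvStepA (st : PySem.Dict String String × Int) (p : String × String) : PySem.Dict String String × Int :=
  let current := PySem.Str.upper (PySem.Str.strip (st.1.getD p.1 ""))
  if p.2 == "UNKNOWN" && current != "" && current != "UNKNOWN" then
    (st.1, st.2 + 1)
  else
    (st.1.insert p.1 p.2, st.2)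

def build_merged_map_py (db_map : List (String × String)) (file_map : List (String × String)) : (List (String × String)) × Int :=
  let r := file_map.foldl pvStepA (PySem.Dict.mk db_map, 0)
  (r.1.items, r.2)

-- ===== PORT B =====
-- Source B's first loop body: decide this db ticker's final value from a file_map lookup
def pvStepB (file_map : PySem.Dict String String) (st : PySem.Dict String String × Int)
    (p : String × String) : PySem.Dict String String × Int :=
  match file_map.get? p.1 with
  | none => (st.1.insert p.1 p.2, st.2)
  | some new_val =>
    let current := PySem.Str.upper (PySem.Str.strip p.2)
    if new_val == "UNKNOWN" && current != "" && current != "UNKNOWN" then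
      (st.1.insert p.1 p.2, st.2 + 1)
    else
      (st.1.insert p.1 new_val, st.2)

def build_merged_map_py_alt (db_map : List (String × String)) (file_map : List (String × String)) : (List (String × String)) × Int :=
  let fd := PySem.Dict.mk file_map
  let dd := PySem.Dict.mk db_map
  let r1 := db_map.foldl (pvStepB fd) (PySem.Dict.empty, 0)
  let merged := file_map.foldl
    (fun m q => if dd.contains q.1 then m else m.insert q.1 q.2) r1.1
  (merged.items, r1.2)

-- ===== PRECONDITION & SPEC =====
-- Pre_ requires both association lists to have pairwise-distinct keys: the Python arguments
-- are dicts, and an association list with duplicate keys does not represent any dict input.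
def Pre_build_merged_map_py (db_map : List (String × String)) (file_map : List (String × String)) : Prop :=
  (db_map.map Prod.fst).Nodup ∧ (file_map.map Prod.fst).Nodup
instance (db_map : List (String × String)) (file_map : List (String × String)) : Decidable (Pre_build_merged_map_py db_map file_map) := by unfold Pre_build_merged_map_py; infer_instance

def pvWitness_build_merged_map_py : (List (String × String)) × (List (String × String)) :=
  ([("AAPL", "NSE"), ("X", "unknown")], [("AAPL", "UNKNOWN"), ("TCS", "BSE"), ("X", "UNKNOWN")])

def Spec_build_merged_map_py (db_map : List (String × String)) (file_map : List (String × String)) (out : (List (String × String)) × Int) : Prop := out = build_merged_map_py_alt db_map file_map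
instance (db_map : List (String × String)) (file_map : List (String × String)) (out : (List (String × String)) × Int) : Decidable (Spec_build_merged_map_py db_map file_map out) := by unfold Spec_build_merged_map_py; infer_instance

-- ===== CLAIM (what is proved, stated in full; the proofs are below) =====
def Claim_equal_build_merged_map_py : Prop := ∀ (db_map : List (String × String)) (file_map : List (String × String)), Dom_build_merged_map_py db_map file_map → Pre_build_merged_map_py db_map file_map → Spec_build_merged_map_py db_map file_map (build_merged_map_py db_map file_map)

-- ===== LEMMAS AND PROOFS =====

-- A's skip test, decided against a fixed dict
def pvSkip (db : PySem.Dict String String) (q : String × String) : Bool :=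
  let current := PySem.Str.upper (PySem.Str.strip (db.getD q.1 ""))
  q.2 == "UNKNOWN" && current != "" && current != "UNKNOWN"

def pvGood (v : String) : Bool :=
  PySem.Str.upper (PySem.Str.strip v) != "" && PySem.Str.upper (PySem.Str.strip v) != "UNKNOWN"

def pvFVal (fd : PySem.Dict String String) (p : String × String) : String × String :=
  match fd.get? p.1 with
  | none => p
  | some nv => if nv == "UNKNOWN" && pvGood p.2 then p else (p.1, nv)

def pvCB (fd : PySem.Dict String String) (p : String × String) : Bool :=
  match fd.get? p.1 with
  | none => false
  | some nv => nv == "UNKNOWN" && pvGood p.2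

def pvP (fd dd : PySem.Dict String String) (k : String) : Bool :=
  (match fd.get? k with | none => false | some nv => nv == "UNKNOWN") && pvGood (dd.getD k "")

-- first-match lookup in a duplicate-free association list finds the member itself
theorem pvGet_mk_of_mem {l : List (String × String)} {p : String × String}
    (hnd : (l.map Prod.fst).Nodup) (hp : p ∈ l) :
    (PySem.Dict.mk l).get? p.1 = some p.2 := by
  induction l with
  | nil => cases hp
  | cons q rest ih =>
    simp only [List.map_cons, List.nodup_cons] at hnd
    rcases List.mem_cons.mp hp with rfl | hmem
    · simp [PySem.Dict.get?, List.find?]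
    · have hne : (q.1 == p.1) = false := by
        simp only [beq_eq_false_iff_ne]
        intro h; exact hnd.1 (h ▸ List.mem_map_of_mem hmem)
      have := ih hnd.2 hmem
      simpa [PySem.Dict.get?, List.find?_cons, hne] using this

theorem pvGet_mk_none {l : List (String × String)} {k : String}
    (h : k ∉ l.map Prod.fst) : (PySem.Dict.mk l).get? k = none := by
  simp only [PySem.Dict.get?, Option.map_eq_none_iff, List.find?_eq_none]
  intro x hx
  simp only [beq_iff_eq]
  intro he
  exact h (he ▸ List.mem_map_of_mem hx)

theorem pvGet_mk_some_mem {l : List (String × String)} {k : String} {v : String}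
    (h : (PySem.Dict.mk l).get? k = some v) : (k, v) ∈ l ∧ k ∈ l.map Prod.fst := by
  simp only [PySem.Dict.get?, Option.map_eq_some_iff] at h
  obtain ⟨p, hfind, hv⟩ := h
  have hmem := List.mem_of_find?_eq_some hfind
  have hkey : p.1 = k := by
    have := List.find?_some hfind
    exact beq_iff_eq.mp this
  constructor
  · have : p = (k, v) := by cases p; simp_all
    exact this ▸ hmem
  · exact hkey ▸ List.mem_map_of_mem hmem

theorem pvContains_iff {l : List (String × String)} {k : String} :
    (PySem.Dict.mk l).contains k = true ↔ k ∈ l.map Prod.fst := by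
  simp [PySem.Dict.contains, List.any_eq_true, List.mem_map, beq_iff_eq]

theorem pvGetD_not_contains {l : List (String × String)} {k : String}
    (h : (PySem.Dict.mk l).contains k = false) : (PySem.Dict.mk l).getD k "" = "" := by
  have : k ∉ l.map Prod.fst := by
    intro hk; rw [pvContains_iff.mpr hk] at h; cases h
  simp [PySem.Dict.getD, pvGet_mk_none this]

-- inserting a key that is not present appends
theorem pvInsert_fresh (m : PySem.Dict String String) (k v : String)
    (h : m.contains k = false) : m.insert k v = PySem.Dict.mk (m.items ++ [(k, v)]) := by
  simp [PySem.Dict.insert, h]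

-- A's loop, started at any state agreeing with db on every pending key
theorem pvLoopA_eq (db : PySem.Dict String String) :
    ∀ (fm : List (String × String)) (m : PySem.Dict String String) (s : Int),
      (fm.map Prod.fst).Nodup →
      (∀ p ∈ fm, m.getD p.1 "" = db.getD p.1 "") →
      fm.foldl pvStepA (m, s)
        = (m.update (fm.filter (fun p => !pvSkip db p)),
           s + ((fm.filter (fun p => pvSkip db p)).length : Int)) := by
  intro fm
  induction fm with
  | nil => intro m s _ _; simp [PySem.Dict.update]
  | cons p rest ih =>
    intro m s hnd hagree
    have hkey : m.getD p.1 "" = db.getD p.1 "" := hagree p (List.mem_cons_self ..)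
    have hnd' : (rest.map Prod.fst).Nodup := (List.nodup_cons.mp hnd).2
    have hne : ∀ q ∈ rest, q.1 ≠ p.1 := by
      intro q hq h
      exact (List.nodup_cons.mp hnd).1 (h ▸ List.mem_map_of_mem hq)
    by_cases hs : pvSkip db p = true
    · have hstep : pvStepA (m, s) p = (m, s + 1) := by
        simp only [pvStepA, pvSkip] at hs ⊢
        rw [hkey, hs]
        rfl
      rw [List.foldl_cons, hstep, ih m (s + 1) hnd'
        (fun q hq => hagree q (List.mem_cons_of_mem _ hq))]
      simp [hs]
      omega
    · have hs' : pvSkip db p = false := by simp at hs; exact hs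
      have hstep : pvStepA (m, s) p = (m.insert p.1 p.2, s) := by
        simp only [pvStepA, pvSkip] at hs' ⊢
        rw [hkey, hs']
        rfl
      have hagree' : ∀ q ∈ rest, (m.insert p.1 p.2).getD q.1 "" = db.getD q.1 "" := by
        intro q hq
        rw [PySem.Dict.getD_insert_of_ne _ _ _ (hne q hq)]
        exact hagree q (List.mem_cons_of_mem _ hq)
      rw [List.foldl_cons, hstep, ih (m.insert p.1 p.2) s hnd' hagree']
      simp [hs']
      rfl

-- shape of Dict.update on a duplicate-free update list
theorem pvUpdate_shape :
    ∀ (L : List (String × String)) (d : PySem.Dict String String),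
      (L.map Prod.fst).Nodup →
      (d.update L).items
        = d.items.map (fun p =>
            match (PySem.Dict.mk L).get? p.1 with
            | some v => (p.1, v)
            | none => p)
          ++ L.filter (fun q => !d.contains q.1) := by
  intro L
  induction L with
  | nil =>
    intro d _
    simp [PySem.Dict.update, pvGet_mk_none]
  | cons q rest ih =>
    intro d hnd
    simp only [List.map_cons, List.nodup_cons] at hnd
    have hqrest : q.1 ∉ rest.map Prod.fst := hnd.1
    have hupd : d.update (q :: rest) = (d.insert q.1 q.2).update rest := by
      simp [PySem.Dict.update]
    rw [hupd, ih _ hnd.2]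
    by_cases hc : d.contains q.1 = true
    · -- in-place overwrite: items are mapped, no append
      have hins : (d.insert q.1 q.2).items
          = d.items.map (fun p => if (p.1 == q.1) = true then (q.1, q.2) else p) := by
        simp [PySem.Dict.insert, hc]
      have hcontains : ∀ k, (d.insert q.1 q.2).contains k = d.contains k := by
        intro k
        simp only [PySem.Dict.contains, hins, List.any_map]
        apply List.any_congr rfl
        intro p
        simp only [Function.comp]
        split
        · next h => rw [beq_iff_eq.mp h]
        · rfl
      have hfilter : rest.filter (fun r => !(d.insert q.1 q.2).contains r.1)
          = rest.filter (fun r => !d.contains r.1) := by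
        apply List.filter_congr; intro r _; rw [hcontains]
      rw [hfilter, hins, List.map_map]
      have hmap : ∀ p ∈ d.items,
          ((fun p =>
            match (PySem.Dict.mk rest).get? p.1 with
            | some v => (p.1, v)
            | none => p) ∘ (fun p => if (p.1 == q.1) = true then (q.1, q.2) else p)) p
          = (fun p =>
            match (PySem.Dict.mk (q :: rest)).get? p.1 with
            | some v => (p.1, v)
            | none => p) p := by
        intro p _
        obtain ⟨pk, pv⟩ := p
        simp only [Function.comp]
        by_cases hpq : pk = q.1
        · subst hpq
          have hfind : List.find? (fun r : String × String => r.1 == q.1) rest = none :=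
            List.find?_eq_none.mpr (fun x hx h =>
              hqrest ((beq_iff_eq.mp h) ▸ List.mem_map_of_mem hx))
          simp [PySem.Dict.get?, List.find?_cons, hfind]
        · have hne : (q.1 == pk) = false := by
            simp only [beq_eq_false_iff_ne]; intro h; exact hpq h.symm
          have hne' : (pk == q.1) = false := by
            simp only [beq_eq_false_iff_ne]; exact hpq
          simp [PySem.Dict.get?, List.find?_cons, hne, hne']
      rw [List.map_congr_left hmap]
      have : (q :: rest).filter (fun r => !d.contains r.1)
          = rest.filter (fun r => !d.contains r.1) := by
        simp [List.filter_cons, hc]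
      rw [this]
    · -- fresh key: appended
      have hc' : d.contains q.1 = false := by simpa using hc
      rw [pvInsert_fresh d q.1 q.2 hc']
      have hcontains : ∀ k, k ≠ q.1 →
          (PySem.Dict.mk (d.items ++ [(q.1, q.2)])).contains k = d.contains k := by
        intro k hk
        simp only [PySem.Dict.contains_mk, PySem.Dict.contains, List.any_append,
          List.any_cons, List.any_nil]
        have : (q.1 == k) = false := by simp [beq_iff_eq]; intro h; exact hk h.symm
        simp [this]
      have hfilter : rest.filter
            (fun r => !(PySem.Dict.mk (d.items ++ [(q.1, q.2)])).contains r.1)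
          = rest.filter (fun r => !d.contains r.1) := by
        apply List.filter_congr; intro r hr
        have : r.1 ≠ q.1 := by
          intro h; exact hqrest (h ▸ List.mem_map_of_mem hr)
        rw [hcontains _ this]
      rw [hfilter]
      have hmapitems :
          (d.items ++ [(q.1, q.2)]).map (fun p =>
              match (PySem.Dict.mk rest).get? p.1 with
              | some v => (p.1, v)
              | none => p)
          = d.items.map (fun p =>
              match (PySem.Dict.mk (q :: rest)).get? p.1 with
              | some v => (p.1, v)
              | none => p) ++ [(q.1, q.2)] := by
        rw [List.map_append]
        congr 1
        · apply List.map_congr_left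
          intro p hp
          have hpq : p.1 ≠ q.1 := by
            intro h
            have : d.contains q.1 = true := by
              simp only [PySem.Dict.contains, List.any_eq_true]
              exact ⟨p, hp, by simp [h]⟩
            rw [this] at hc'; cases hc'
          have hne : (q.1 == p.1) = false := by
            simp only [beq_eq_false_iff_ne]; intro h; exact hpq h.symm
          simp [PySem.Dict.get?, List.find?_cons, hne]
        · simp [pvGet_mk_none hqrest]
      rw [hmapitems]
      have : (q :: rest).filter (fun r => !d.contains r.1)
          = q :: rest.filter (fun r => !d.contains r.1) := by
        simp [List.filter_cons, hc']
      rw [this]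
      simp

theorem pvGet_mk_none_iff {l : List (String × String)} {k : String} :
    (PySem.Dict.mk l).get? k = none ↔ k ∉ l.map Prod.fst := by
  constructor
  · intro h hk
    obtain ⟨p, hp, he⟩ := List.mem_map.mp hk
    simp only [PySem.Dict.get?, Option.map_eq_none_iff, List.find?_eq_none] at h
    exact h p hp (by simp [he])
  · exact pvGet_mk_none

theorem pvFVal_fst (fd : PySem.Dict String String) (p : String × String) :
    (pvFVal fd p).1 = p.1 := by
  unfold pvFVal
  cases fd.get? p.1 with
  | none => rfl
  | some nv => dsimp only; split <;> rfl

-- B's first loop: append each db entry's final value, count the blocked UNKNOWN overwrites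
theorem pvLoopB1_eq (fd : PySem.Dict String String) :
    ∀ (db : List (String × String)) (m : PySem.Dict String String) (s : Int),
      (db.map Prod.fst).Nodup →
      (∀ p ∈ db, m.contains p.1 = false) →
      db.foldl (pvStepB fd) (m, s)
        = (PySem.Dict.mk (m.items ++ db.map (pvFVal fd)),
           s + (db.countP (pvCB fd) : Int)) := by
  intro db
  induction db with
  | nil => intro m s _ _; simp
  | cons p rest ih =>
    intro m s hnd hfresh
    have hpf : m.contains p.1 = false := hfresh p (List.mem_cons_self ..)
    have hnd' : (rest.map Prod.fst).Nodup := (List.nodup_cons.mp hnd).2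
    have hne : ∀ q ∈ rest, q.1 ≠ p.1 := by
      intro q hq h
      exact (List.nodup_cons.mp hnd).1 (h ▸ List.mem_map_of_mem hq)
    have hfresh' : ∀ x : String, ∀ q ∈ rest, q.1 ≠ p.1 →
        (PySem.Dict.mk (m.items ++ [(p.1, x)])).contains q.1 = false := by
      intro x q hq hqp
      have h1 := hfresh q (List.mem_cons_of_mem _ hq)
      simp only [PySem.Dict.contains, PySem.Dict.contains_mk, List.any_append,
        List.any_cons, List.any_nil] at h1 ⊢
      have : (p.1 == q.1) = false := by
        simp only [beq_eq_false_iff_ne]; intro h; exact hqp h.symm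
      simp [h1, this]
    have hstep : pvStepB fd (m, s) p
        = (PySem.Dict.mk (m.items ++ [pvFVal fd p]),
           s + (if pvCB fd p then 1 else 0)) := by
      unfold pvStepB pvFVal pvCB
      cases hg : fd.get? p.1 with
      | none =>
        simp [pvInsert_fresh m p.1 p.2 hpf]
      | some nv =>
        dsimp only
        by_cases hcond : (nv == "UNKNOWN"
            && PySem.Str.upper (PySem.Str.strip p.2) != ""
            && PySem.Str.upper (PySem.Str.strip p.2) != "UNKNOWN") = true
        · have hcb : (nv == "UNKNOWN" && pvGood p.2) = true := by
            simpa [pvGood, Bool.and_assoc] using hcond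
          simp [hcond, hcb, pvInsert_fresh m p.1 p.2 hpf]
        · have hcond' := Bool.eq_false_iff.mpr hcond
          have hcb : (nv == "UNKNOWN" && pvGood p.2) = false := by
            simpa [pvGood, Bool.and_assoc] using hcond'
          simp [hcond', hcb, pvInsert_fresh m p.1 nv hpf]
    have hfst : (pvFVal fd p).1 = p.1 := pvFVal_fst fd p
    have hfresh2 : ∀ q ∈ rest,
        (PySem.Dict.mk (m.items ++ [pvFVal fd p])).contains q.1 = false := by
      intro q hq
      have h := hfresh' (pvFVal fd p).2 q hq (hne q hq)
      have hpair : (p.1, (pvFVal fd p).2) = pvFVal fd p := by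
        cases hv : pvFVal fd p with
        | mk a b => rw [show a = p.1 from by rw [← hfst, hv]]
      rwa [hpair] at h
    rw [List.foldl_cons, hstep, ih _ _ hnd' hfresh2]
    simp only [List.map_cons, List.countP_cons, List.append_assoc,
      List.singleton_append, Prod.mk.injEq]
    refine ⟨trivial, ?_⟩
    push_cast
    by_cases hcb : pvCB fd p = true <;> simp [hcb] <;> ring

-- B's second loop: append the file-only tickers in file_map order
theorem pvLoopB2_eq (dd : PySem.Dict String String) :
    ∀ (fm : List (String × String)) (m : PySem.Dict String String),
      (fm.map Prod.fst).Nodup →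
      (∀ q ∈ fm, dd.contains q.1 = false → m.contains q.1 = false) →
      fm.foldl (fun m q => if dd.contains q.1 then m else m.insert q.1 q.2) m
        = PySem.Dict.mk (m.items ++ fm.filter (fun q => !dd.contains q.1)) := by
  intro fm
  induction fm with
  | nil => intro m _ _; simp
  | cons q rest ih =>
    intro m hnd hfresh
    have hnd' : (rest.map Prod.fst).Nodup := (List.nodup_cons.mp hnd).2
    have hne : ∀ r ∈ rest, r.1 ≠ q.1 := by
      intro r hr h
      exact (List.nodup_cons.mp hnd).1 (h ▸ List.mem_map_of_mem hr)
    by_cases hc : dd.contains q.1 = true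
    · rw [List.foldl_cons]
      simp only [hc, if_true]
      rw [ih m hnd' (fun r hr h => hfresh r (List.mem_cons_of_mem _ hr) h)]
      simp [List.filter_cons, hc]
    · have hc' : dd.contains q.1 = false := by simpa using hc
      have hmf : m.contains q.1 = false := hfresh q (List.mem_cons_self ..) hc'
      rw [List.foldl_cons]
      simp only [hc', if_false, Bool.false_eq_true]
      rw [pvInsert_fresh m q.1 q.2 hmf]
      have hfresh' : ∀ r ∈ rest, dd.contains r.1 = false →
          (PySem.Dict.mk (m.items ++ [(q.1, q.2)])).contains r.1 = false := by
        intro r hr h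
        have h1 := hfresh r (List.mem_cons_of_mem _ hr) h
        simp only [PySem.Dict.contains, List.any_append, List.any_cons,
          List.any_nil] at h1 ⊢
        have : (q.1 == r.1) = false := by
          simp only [beq_eq_false_iff_ne]; intro he; exact hne r hr he.symm
        simp [h1, this]
      rw [ih _ hnd' hfresh']
      simp [List.filter_cons, hc', List.append_assoc]

-- the skip test against a fixed dict agrees with the key-level predicate (file side)
theorem pvSkip_eq_pvP (fd dd : PySem.Dict String String)
    {fm : List (String × String)} (hnd : (fm.map Prod.fst).Nodup)
    (hfd : fd = PySem.Dict.mk fm) :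
    ∀ q ∈ fm, pvSkip dd q = pvP fd dd q.1 := by
  intro q hq
  have hget : fd.get? q.1 = some q.2 := hfd ▸ pvGet_mk_of_mem hnd hq
  simp [pvSkip, pvP, pvGood, hget, Bool.and_assoc]

-- B's per-db-entry count agrees with the key-level predicate (db side)
theorem pvCB_eq_pvP (fd dd : PySem.Dict String String)
    {db : List (String × String)} (hnd : (db.map Prod.fst).Nodup)
    (hdd : dd = PySem.Dict.mk db) :
    ∀ p ∈ db, pvCB fd p = pvP fd dd p.1 := by
  intro p hp
  have hget : dd.get? p.1 = some p.2 := hdd ▸ pvGet_mk_of_mem hnd hp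
  have hgetD : dd.getD p.1 "" = p.2 := by simp [PySem.Dict.getD, hget]
  unfold pvCB pvP
  rw [hgetD]
  cases fd.get? p.1 <;> simp

-- the key-level predicate holds only on keys present in BOTH maps
theorem pvP_mem {fd dd : PySem.Dict String String}
    {fm db : List (String × String)} (hfd : fd = PySem.Dict.mk fm)
    (hdd : dd = PySem.Dict.mk db) {k : String} (h : pvP fd dd k = true) :
    k ∈ fm.map Prod.fst ∧ k ∈ db.map Prod.fst := by
  unfold pvP at h
  constructor
  · cases hg : fd.get? k with
    | none => rw [hg] at h; simp at h
    | some nv => exact (pvGet_mk_some_mem (hfd ▸ hg)).2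
  · by_cases hc : dd.contains k = true
    · exact pvContains_iff.mp (hdd ▸ hc)
    · have hc' : dd.contains k = false := by simpa using hc
      have : dd.getD k "" = "" := hdd ▸ pvGetD_not_contains (hdd ▸ hc')
      rw [this] at h
      have : pvGood "" = false := by decide
      simp [this] at h

-- both skip counts equal the number of keys satisfying the key-level predicate
theorem pvCount_eq {fd dd : PySem.Dict String String}
    {fm db : List (String × String)}
    (hndf : (fm.map Prod.fst).Nodup) (hndd : (db.map Prod.fst).Nodup)
    (hfd : fd = PySem.Dict.mk fm) (hdd : dd = PySem.Dict.mk db) :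
    (fm.filter (fun p => pvSkip dd p)).length = db.countP (pvCB fd) := by
  have hA : (fm.filter (fun p => pvSkip dd p)).length
      = (fm.map Prod.fst).countP (pvP fd dd) := by
    rw [← List.countP_eq_length_filter, List.countP_map]
    exact List.countP_congr (fun q hq => by
      rw [pvSkip_eq_pvP fd dd hndf hfd q hq]; exact Iff.rfl)
  have hB : db.countP (pvCB fd) = (db.map Prod.fst).countP (pvP fd dd) := by
    rw [List.countP_map]
    exact List.countP_congr (fun p hp => by
      rw [pvCB_eq_pvP fd dd hndd hdd p hp]; exact Iff.rfl)
  rw [hA, hB]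
  rw [List.countP_eq_length_filter, List.countP_eq_length_filter]
  apply List.Perm.length_eq
  rw [List.perm_ext_iff_of_nodup (hndf.filter _) (hndd.filter _)]
  intro k
  simp only [List.mem_filter]
  constructor
  · rintro ⟨_, hP⟩; exact ⟨(pvP_mem hfd hdd hP).2, hP⟩
  · rintro ⟨_, hP⟩; exact ⟨(pvP_mem hfd hdd hP).1, hP⟩

-- a non-skipped overwrite of a db key lands on the same value B computes directly
theorem pvMap_eq {fd dd : PySem.Dict String String}
    {fm db : List (String × String)}
    (hndf : (fm.map Prod.fst).Nodup) (hndd : (db.map Prod.fst).Nodup)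
    (hfd : fd = PySem.Dict.mk fm) (hdd : dd = PySem.Dict.mk db) :
    ∀ p ∈ db,
      (match (PySem.Dict.mk (fm.filter (fun q => !pvSkip dd q))).get? p.1 with
       | some v => (p.1, v)
       | none => p)
      = pvFVal fd p := by
  intro p hp
  have hndk : ((fm.filter (fun q => !pvSkip dd q)).map Prod.fst).Nodup :=
    List.Nodup.sublist (List.Sublist.map _ List.filter_sublist) hndf
  have hgetdb : dd.get? p.1 = some p.2 := hdd ▸ pvGet_mk_of_mem hndd hp
  have hgetDdb : dd.getD p.1 "" = p.2 := by simp [PySem.Dict.getD, hgetdb]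
  cases hf : fd.get? p.1 with
  | none =>
    have hnot : p.1 ∉ fm.map Prod.fst := pvGet_mk_none_iff.mp (hfd ▸ hf)
    have hnotk : p.1 ∉ (fm.filter (fun q => !pvSkip dd q)).map Prod.fst := by
      intro h
      exact hnot (List.Sublist.mem h (List.Sublist.map _ List.filter_sublist))
    rw [pvGet_mk_none hnotk]
    simp [pvFVal, hf]
  | some nv =>
    have hmemfm : (p.1, nv) ∈ fm := (pvGet_mk_some_mem (hfd ▸ hf)).1
    have hskipval : pvSkip dd (p.1, nv) = (nv == "UNKNOWN" && pvGood p.2) := by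
      simp [pvSkip, pvGood, hgetDdb, Bool.and_assoc]
    by_cases hc : (nv == "UNKNOWN" && pvGood p.2) = true
    · -- skipped: the entry is filtered out, so the db entry survives unchanged
      have hnotk : p.1 ∉ (fm.filter (fun q => !pvSkip dd q)).map Prod.fst := by
        intro h
        obtain ⟨r, hr, hre⟩ := List.mem_map.mp h
        have hrfm : r ∈ fm := (List.mem_filter.mp hr).1
        have hrkeep : pvSkip dd r = false := by
          have := (List.mem_filter.mp hr).2; simpa using this
        have : r = (p.1, nv) :=
          List.inj_on_of_nodup_map hndf hrfm hmemfm (by rw [hre])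
        rw [this, hskipval, hc] at hrkeep
        cases hrkeep
      rw [pvGet_mk_none hnotk]
      simp [pvFVal, hf, hc]
    · have hc' : (nv == "UNKNOWN" && pvGood p.2) = false := by simpa using hc
      have hkeep : (p.1, nv) ∈ fm.filter (fun q => !pvSkip dd q) := by
        rw [List.mem_filter]
        exact ⟨hmemfm, by rw [hskipval, hc']; rfl⟩
      have := pvGet_mk_of_mem hndk hkeep
      rw [this]
      simp [pvFVal, hf, hc']

-- a skipped entry always targets a db key, so filtering file-only tickers ignores skips
theorem pvExtras_eq {dd : PySem.Dict String String} {fm : List (String × String)} :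
    (fm.filter (fun q => !pvSkip dd q)).filter (fun q => !dd.contains q.1)
      = fm.filter (fun q => !dd.contains q.1) := by
  rw [List.filter_filter]
  apply List.filter_congr
  intro q _
  by_cases hc : dd.contains q.1 = true
  · simp [hc]
  · have hc' : dd.contains q.1 = false := by simpa using hc
    have hgetD : dd.getD q.1 "" = "" := by
      rcases dd with ⟨l⟩
      exact pvGetD_not_contains hc'
    have hskip : pvSkip dd q = false := by
      have hemp : PySem.Str.upper (PySem.Str.strip "") = "" := by decide
      simp [pvSkip, hgetD, hemp]
    simp [hc', hskip]

-- ===== VERDICT (by name: the statement is the Claim_ definition above) =====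
theorem build_merged_map_py_spec : Claim_equal_build_merged_map_py := by
  intro db fm _ hpre
  obtain ⟨hndd, hndf⟩ := hpre
  unfold Spec_build_merged_map_py build_merged_map_py build_merged_map_py_alt
  have hndk : ((fm.filter (fun q => !pvSkip (PySem.Dict.mk db) q)).map Prod.fst).Nodup :=
    List.Nodup.sublist (List.Sublist.map _ List.filter_sublist) hndf
  -- A's loop
  dsimp only
  rw [pvLoopA_eq (PySem.Dict.mk db) fm (PySem.Dict.mk db) 0 hndf (fun _ _ => rfl)]
  -- B's first loop
  rw [pvLoopB1_eq (PySem.Dict.mk fm) db PySem.Dict.empty 0 hndd (fun _ _ => rfl)]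
  -- B's second loop
  have hfreshB2 : ∀ q ∈ fm, (PySem.Dict.mk db).contains q.1 = false →
      (PySem.Dict.mk (PySem.Dict.empty.items ++ db.map (pvFVal (PySem.Dict.mk fm)))).contains q.1
        = false := by
    intro q _ hq
    have h1 : q.1 ∉ db.map Prod.fst := by
      intro h; rw [pvContains_iff.mpr h] at hq; cases hq
    have h2 : (db.map (pvFVal (PySem.Dict.mk fm))).map Prod.fst = db.map Prod.fst := by
      rw [List.map_map]
      exact List.map_congr_left (fun p _ => pvFVal_fst _ p)
    have : q.1 ∉ (PySem.Dict.empty.items ++ db.map (pvFVal (PySem.Dict.mk fm))).map Prod.fst := by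
      simpa [PySem.Dict.empty, h2] using h1
    cases hcc : (PySem.Dict.mk
        (PySem.Dict.empty.items ++ db.map (pvFVal (PySem.Dict.mk fm)))).contains q.1 with
    | false => rfl
    | true => exact absurd (pvContains_iff.mp hcc) this
  rw [pvLoopB2_eq (PySem.Dict.mk db) fm _ hndf hfreshB2]
  -- componentwise
  rw [Prod.mk.injEq]
  constructor
  · rw [pvUpdate_shape _ (PySem.Dict.mk db) hndk]
    rw [List.map_congr_left (pvMap_eq hndf hndd rfl rfl)]
    rw [pvExtras_eq]
    simp [PySem.Dict.empty]
  · rw [pvCount_eq hndf hndd rfl rfl]
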